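-- pv_equiv track=rewrite | github.com/UlugbekMuslitdinov/CSC120 | shorts12.py | preorder_to_bst
-- ===== SOURCE A (Python) =====
-- def preorder_to_bst(preorder):
--     if not preorder:
--         return "None"
--     root = preorder[0]
--     left = []
--     right = []
--     for i in range(1, len(preorder)):
--         if preorder[i] < root:
--             left.append(preorder[i])
--         else:
--             right.append(preorder[i])
--     left_tree = str(preorder_to_bst(left))
--     right_tree = str(preorder_to_bst(right))
--     if not left:
--         left_tree = "None"
--     if not right:
--         right_tree = "None"
--     return "(" + str(root) + " " + left_tree + " " + right_tree + ")"
-- ===== SOURCE B (Python) =====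
-- def preorder_to_bst(preorder):
--     def insert(t, x):
--         if t is None:
--             return (x, None, None)
--         v, l, r = t
--         if x < v:
--             return (v, insert(l, x), r)
--         else:
--             return (v, l, insert(r, x))
--
--     def ser(t):
--         if t is None:
--             return "None"
--         v, l, r = t
--         return "(" + str(v) + " " + ser(l) + " " + ser(r) + ")"
--
--     t = None
--     for x in preorder:
--         t = insert(t, x)
--     return ser(t)
-- ===== Notes on version B (the rewrite author's own statement) =====
-- stated objective: alternative
-- what changed: A recursively partitions the tail into <root / >=root sublists (quicksort-style) and recurses on the pieces; B builds an explicit BST by inserting the elements left to right into a tree structure and then serializes it in one traversal.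
import Mathlib
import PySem

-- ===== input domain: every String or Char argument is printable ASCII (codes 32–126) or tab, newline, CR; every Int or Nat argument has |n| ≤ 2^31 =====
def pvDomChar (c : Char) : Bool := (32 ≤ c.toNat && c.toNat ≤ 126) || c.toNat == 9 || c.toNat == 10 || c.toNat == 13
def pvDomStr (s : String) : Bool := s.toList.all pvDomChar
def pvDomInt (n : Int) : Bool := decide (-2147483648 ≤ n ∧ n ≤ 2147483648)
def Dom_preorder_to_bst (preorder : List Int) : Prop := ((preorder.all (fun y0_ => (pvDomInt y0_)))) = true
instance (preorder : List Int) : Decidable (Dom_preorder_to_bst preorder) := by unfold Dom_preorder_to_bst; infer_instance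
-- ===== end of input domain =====

-- B replaces A's recursive partition-and-recurse with sequential BST insertion into an
-- explicit tree followed by one serializing traversal (alternative algorithm, same cost).

-- ===== PORT A =====
-- the partition loop of A: fold over the tail appending to (left, right)
def pvPartStep (root : Int) (lr : List Int × List Int) (x : Int) : List Int × List Int :=
  if x < root then (lr.1 ++ [x], lr.2) else (lr.1, lr.2 ++ [x])

-- needed by the port's termination proof
theorem pvPart_eq (root : Int) (rest : List Int) (a b : List Int) :
    rest.foldl (pvPartStep root) (a, b)
      = (a ++ rest.filter (fun x => decide (x < root)),
         b ++ rest.filter (fun x => !decide (x < root))) := by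
  induction rest generalizing a b with
  | nil => simp
  | cons y ys ih =>
    simp only [List.foldl_cons, pvPartStep, List.filter_cons]
    by_cases h : y < root <;> simp [h, ih]

def preorder_to_bst (preorder : List Int) : String :=
  match preorder with
  | [] => "None"
  | root :: rest =>
    let lr := rest.foldl (pvPartStep root) ([], [])
    let left := lr.1
    let right := lr.2
    let left_tree := preorder_to_bst left
    let right_tree := preorder_to_bst right
    let left_tree := if left = [] then "None" else left_tree
    let right_tree := if right = [] then "None" else right_tree
    "(" ++ PySem.Int.toStr root ++ " " ++ left_tree ++ " " ++ right_tree ++ ")"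
termination_by preorder.length
decreasing_by
  · simp [pvPart_eq]
    exact List.length_filter_le _ _
  · simp [pvPart_eq]
    exact List.length_filter_le _ _

-- ===== PORT B =====
inductive PvTree where
  | leaf : PvTree
  | node : Int → PvTree → PvTree → PvTree
deriving DecidableEq, Repr

def pvInsert : PvTree → Int → PvTree
  | .leaf, x => .node x .leaf .leaf
  | .node v l r, x =>
    if x < v then .node v (pvInsert l x) r else .node v l (pvInsert r x)

def pvSer : PvTree → String
  | .leaf => "None"
  | .node v l r => "(" ++ PySem.Int.toStr v ++ " " ++ pvSer l ++ " " ++ pvSer r ++ ")"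

def preorder_to_bst_alt (preorder : List Int) : String :=
  pvSer (preorder.foldl pvInsert .leaf)

-- ===== PRECONDITION & SPEC =====
def Spec_preorder_to_bst (preorder : List Int) (out : String) : Prop := out = preorder_to_bst_alt preorder
instance (preorder : List Int) (out : String) : Decidable (Spec_preorder_to_bst preorder out) := by unfold Spec_preorder_to_bst; infer_instance

-- ===== CLAIM (what is proved, stated in full; the proofs are below) =====
def Claim_equal_preorder_to_bst : Prop := ∀ (preorder : List Int), Dom_preorder_to_bst preorder → Spec_preorder_to_bst preorder (preorder_to_bst preorder)

-- ===== LEMMAS AND PROOFS =====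

-- inserting a sequence into a node distributes over the subtrees by comparison with the root
theorem pvInsert_foldl_node (v : Int) (ys : List Int) (l r : PvTree) :
    ys.foldl pvInsert (.node v l r)
      = .node v (List.foldl pvInsert l (ys.filter (fun x => decide (x < v))))
                (List.foldl pvInsert r (ys.filter (fun x => !decide (x < v)))) := by
  induction ys generalizing l r with
  | nil => simp
  | cons y ys ih =>
    simp only [List.foldl_cons, List.filter_cons]
    by_cases h : y < v <;> simp [pvInsert, h, ih]

theorem pv_A_eq_B : ∀ xs : List Int, preorder_to_bst xs = pvSer (xs.foldl pvInsert .leaf)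
  | [] => by simp [preorder_to_bst, pvSer]
  | x :: rest => by
    have hl := pv_A_eq_B (rest.filter (fun y => decide (y < x)))
    have hr := pv_A_eq_B (rest.filter (fun y => !decide (y < x)))
    rw [preorder_to_bst]
    simp only [pvPart_eq, List.nil_append, List.foldl_cons]
    have hins : rest.foldl pvInsert (pvInsert .leaf x)
        = .node x (List.foldl pvInsert .leaf (rest.filter (fun y => decide (y < x))))
                  (List.foldl pvInsert .leaf (rest.filter (fun y => !decide (y < x)))) := by
      simpa [pvInsert] using pvInsert_foldl_node x rest .leaf .leaf
    rw [hins, pvSer]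
    by_cases hL : rest.filter (fun y => decide (y < x)) = [] <;>
      by_cases hR : rest.filter (fun y => !decide (y < x)) = [] <;>
      simp [hL, hR, hl, hr, pvSer]
termination_by xs => xs.length
decreasing_by
  · exact Nat.lt_succ_of_le (List.length_filter_le _ _)
  · exact Nat.lt_succ_of_le (List.length_filter_le _ _)

-- ===== VERDICT (by name: the statement is the Claim_ definition above) =====
theorem preorder_to_bst_spec : Claim_equal_preorder_to_bst := by
  intro preorder _
  unfold Spec_preorder_to_bst preorder_to_bst_alt
  exact pv_A_eq_B preorder
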